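-- pv_equiv track=rewrite | github.com/Pat4008/BCD_Converter | BCD_8.py | add_space
-- ===== SOURCE A (Python) =====
-- def add_space(binary):
--     temp = ''
--     spaced = ''
--
--     while len(binary) % 4 != 0:
--         binary = '0' + binary
--
--     for bit in binary:
--         temp = temp + bit
--         if len(temp) == 4:
--             spaced = spaced + temp + ' '
--             temp = ''
--     return spaced
-- ===== SOURCE B (Python) =====
-- def add_space(binary):
--     pad = (4 - len(binary) % 4) % 4
--     binary = '0' * pad + binary
--     return ''.join(binary[i:i+4] + ' ' for i in range(0, len(binary), 4))
-- ===== Notes on version B (the rewrite author's own statement) =====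
-- stated objective: simpler
-- what changed: Replaces the one-zero-at-a-time while loop with a closed-form modulo pad and the per-bit accumulate-and-flush string concatenation with direct 4-character slicing joined in one pass.
import Mathlib
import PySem

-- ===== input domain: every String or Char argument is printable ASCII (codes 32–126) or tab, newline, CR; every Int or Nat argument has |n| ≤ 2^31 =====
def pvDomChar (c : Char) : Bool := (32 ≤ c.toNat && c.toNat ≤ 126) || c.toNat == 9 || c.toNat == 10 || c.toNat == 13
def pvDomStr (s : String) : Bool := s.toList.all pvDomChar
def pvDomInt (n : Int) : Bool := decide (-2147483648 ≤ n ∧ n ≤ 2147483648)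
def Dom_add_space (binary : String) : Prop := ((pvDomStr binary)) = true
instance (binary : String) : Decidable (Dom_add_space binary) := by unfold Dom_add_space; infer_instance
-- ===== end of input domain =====

-- B replaces A's one-zero-at-a-time padding loop with a closed-form modulo pad,
-- and its per-bit accumulate-and-flush loop with direct 4-character slicing.

-- ===== PORT A =====
-- while len(binary) % 4 != 0: binary = '0' + binary
def padA (l : List Char) : List Char :=
  if l.length % 4 ≠ 0 then padA ('0' :: l) else l
termination_by (4 - l.length % 4) % 4
decreasing_by
  simp only [List.length_cons]
  omega

-- for bit in binary: temp += bit; if len(temp)==4: spaced += temp + ' '; temp = ''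
def loopA (temp spaced : List Char) : List Char → List Char
  | [] => spaced
  | b :: rest =>
    let temp' := temp ++ [b]
    if temp'.length = 4 then loopA [] (spaced ++ temp' ++ [' ']) rest
    else loopA temp' spaced rest

def add_space (binary : String) : String :=
  String.mk (loopA [] [] (padA binary.toList))

-- ===== PORT B =====
-- ''.join(binary[i:i+4] + ' ' for i in range(0, len(binary), 4)), as step-4 slicing
def chunksB : List Char → List Char
  | [] => []
  | a :: rest => ((a :: rest).take 4 ++ [' ']) ++ chunksB ((a :: rest).drop 4)
termination_by l => l.length
decreasing_by simp only [List.length_drop, List.length_cons]; omega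

def add_space_alt (binary : String) : String :=
  String.mk (chunksB (List.replicate ((4 - binary.toList.length % 4) % 4) '0' ++ binary.toList))

-- ===== PRECONDITION & SPEC =====
def Spec_add_space (binary : String) (out : String) : Prop := out = add_space_alt binary
instance (binary : String) (out : String) : Decidable (Spec_add_space binary out) := by unfold Spec_add_space; infer_instance

-- ===== CLAIM (what is proved, stated in full; the proofs are below) =====
def Claim_equal_add_space : Prop := ∀ (binary : String), Dom_add_space binary → Spec_add_space binary (add_space binary)

-- ===== LEMMAS AND PROOFS =====

theorem padA_step (l : List Char) (h : l.length % 4 ≠ 0) : padA l = padA ('0' :: l) := by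
  rw [padA]; simp [h]

theorem padA_done (l : List Char) (h : l.length % 4 = 0) : padA l = l := by
  rw [padA]; simp [h]

-- A's while loop prepends exactly the closed-form number of zeros.
theorem padA_eq (l : List Char) :
    padA l = List.replicate ((4 - l.length % 4) % 4) '0' ++ l := by
  have h4 : l.length % 4 < 4 := Nat.mod_lt _ (by omega)
  interval_cases h : l.length % 4
  · rw [padA_done l h]; simp
  · rw [padA_step l (by omega), padA_step _ (by simp; omega),
        padA_step _ (by simp; omega), padA_done _ (by simp; omega)]
    simp [List.replicate_succ]
  · rw [padA_step l (by omega), padA_step _ (by simp; omega),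
        padA_done _ (by simp; omega)]
    simp [List.replicate_succ]
  · rw [padA_step l (by omega), padA_done _ (by simp; omega)]
    simp [List.replicate_succ]

-- A's accumulate-and-flush loop over a 4-divisible list equals chunked slicing.
theorem loopA_eq (l : List Char) (spaced : List Char) (h : l.length % 4 = 0) :
    loopA [] spaced l = spaced ++ chunksB l := by
  induction hn : l.length using Nat.strong_induction_on generalizing l spaced with
  | _ n ih =>
    match l with
    | [] => simp [loopA, chunksB]
    | [a] => simp at h
    | [a,b] => simp at h
    | [a,b,c] => simp at h
    | a :: b :: c :: d :: rest =>
      simp only [List.length_cons] at h hn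
      simp only [loopA, List.nil_append, List.length_cons, List.length_nil]
      norm_num
      rw [ih rest.length (by omega) rest _ (by omega) rfl]
      simp [chunksB]

-- ===== VERDICT (by name: the statement is the Claim_ definition above) =====
theorem add_space_spec : Claim_equal_add_space := by
  intro binary _
  unfold Spec_add_space add_space add_space_alt
  rw [padA_eq]
  rw [loopA_eq]
  · simp
  · simp; omega
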